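-- pv_equiv track=rewrite | github.com/malachyfernandez/base-with-cache | scripts/migrate_row_column_gap.py | split_template
-- ===== SOURCE A (Python) =====
-- def split_template(content):
--     pieces = []
--     start = 0
--     while True:
--         expr_start = content.find('${', start)
--         if expr_start == -1:
--             pieces.append(('text', content[start:]))
--             break
--         if expr_start > start:
--             pieces.append(('text', content[start:expr_start]))
--         i = expr_start + 2
--         depth = 1
--         quote = None
--         escaped = False
--         while i < len(content) and depth > 0:
--             ch = content[i]
--             if quote:
--                 if escaped:
--                     escaped = False
--                 elif ch == '\\':
--                     escaped = True
--                 elif ch == quote: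
--                     quote = None
--                 i += 1
--                 continue
--             if ch in ('"', "'", '`'):
--                 quote = ch
--             elif ch == '{':
--                 depth += 1
--             elif ch == '}':
--                 depth -= 1
--             i += 1
--         pieces.append(('expr', content[expr_start:i]))
--         start = i
--     return pieces
-- ===== SOURCE B (Python) =====
-- def split_template(content):
--     # Pure character-stream state machine: one for-loop over the characters,
--     # no indices, no find(), no slicing; pieces are built by accumulating
--     # characters into buffers, with a one-character lookbehind for '$'.
--     pieces = []
--     buf = []            # characters of the pending text piece
--     ebuf = []           # characters of the expression being read
--     in_expr = False
--     dollar = False      # a '$' seen in text mode, awaiting a possible '{'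
--     depth = 0
--     quote = None
--     escaped = False
--     for ch in content:
--         if in_expr:
--             ebuf.append(ch)
--             if quote:
--                 if escaped:
--                     escaped = False
--                 elif ch == '\\':
--                     escaped = True
--                 elif ch == quote:
--                     quote = None
--             elif ch in ('"', "'", '`'):
--                 quote = ch
--             elif ch == '{':
--                 depth += 1
--             elif ch == '}':
--                 depth -= 1
--                 if depth == 0:
--                     pieces.append(('expr', ''.join(ebuf)))
--                     ebuf = []
--                     in_expr = False
--         elif dollar:
--             if ch == '{':
--                 if buf:
--                     pieces.append(('text', ''.join(buf)))
--                 buf = []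
--                 ebuf = ['$', '{']
--                 in_expr = True
--                 dollar = False
--                 depth = 1
--                 quote = None
--                 escaped = False
--             elif ch == '$':
--                 buf.append('$')
--             else:
--                 buf.append('$')
--                 buf.append(ch)
--                 dollar = False
--         else:
--             if ch == '$':
--                 dollar = True
--             else:
--                 buf.append(ch)
--     if in_expr:
--         pieces.append(('expr', ''.join(ebuf)))
--         pieces.append(('text', ''))
--     else:
--         if dollar:
--             buf.append('$')
--         pieces.append(('text', ''.join(buf)))
--     return pieces
-- ===== Notes on version B (the rewrite author's own statement) =====
-- stated objective: alternative
-- what changed: Replaces A's index-based scanning (str.find for the next '${', a nested inner while over indices, and slicing out pieces) by a pure character-stream state machine: one for-loop over the characters with no indices, no find and no slicing, building each piece by accumulating characters into buffers and resolving '${' with a one-character '$' lookbehind flag.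
import Mathlib
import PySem

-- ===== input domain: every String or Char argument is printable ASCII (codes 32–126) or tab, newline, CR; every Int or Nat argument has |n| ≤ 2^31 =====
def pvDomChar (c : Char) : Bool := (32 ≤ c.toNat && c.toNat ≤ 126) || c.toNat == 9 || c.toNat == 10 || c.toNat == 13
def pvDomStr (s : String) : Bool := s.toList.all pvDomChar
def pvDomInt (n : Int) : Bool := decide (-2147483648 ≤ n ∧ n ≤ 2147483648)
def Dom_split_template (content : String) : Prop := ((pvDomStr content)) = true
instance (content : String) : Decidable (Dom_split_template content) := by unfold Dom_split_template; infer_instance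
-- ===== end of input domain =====

-- B replaces A's index-based scanning (find the next '${', nested inner while, slices) with a pure
-- character-stream state machine: one pass over the characters, no indices/find/slices, pieces built
-- by accumulating characters, '${' resolved with a one-character '$' lookbehind (objective: alternative).

-- ===== PORT A =====
-- tiny measure lemma cited by decreasing_by (named so the definitions stay small terms)
theorem pvDec1 {n i : Nat} (h : i < n) : n - (i + 1) < n - i := by omega

-- inner `while i < len(content) and depth > 0` loop of A: returns the final i
def pvExprScanA (cs : List Char) (i : Nat) (depth : Int) (quote : Option Char) (escaped : Bool) : Nat :=
  if h : i < cs.length ∧ 0 < depth then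
    have hi : i < cs.length := h.1
    let ch := cs[i]
    match quote with
    | some q =>
      if escaped then pvExprScanA cs (i + 1) depth (some q) false
      else if ch = '\\' then pvExprScanA cs (i + 1) depth (some q) true
      else if ch = q then pvExprScanA cs (i + 1) depth none escaped
      else pvExprScanA cs (i + 1) depth (some q) escaped
    | none =>
      if ch = '"' ∨ ch = '\'' ∨ ch = '`' then pvExprScanA cs (i + 1) depth (some ch) escaped
      else if ch = '{' then pvExprScanA cs (i + 1) (depth + 1) none escaped
      else if ch = '}' then pvExprScanA cs (i + 1) (depth - 1) none escaped
      else pvExprScanA cs (i + 1) depth none escaped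
  else i
termination_by cs.length - i
decreasing_by all_goals exact pvDec1 h.1

-- content.find('${', start) of the outer loop
def pvFindA (cs : List Char) (start : Nat) : Int :=
  PySem.Chars.findFrom cs ['$', '{'] (start : Int) none

-- `i` after the inner scan that starts at expr_start + 2 with depth 1
def pvScanIA (cs : List Char) (eN : Nat) : Nat :=
  pvExprScanA cs (eN + 2) 1 none false

-- the ('text', content[start:expr_start]) append guarded by expr_start > start
def pvAccA (cs : List Char) (start eN : Nat) (acc : List (String × String)) : List (String × String) :=
  if start < eN then
    acc ++ [("text", String.ofList (PySem.List.slice cs (some (start : Int)) (some (eN : Int))))]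
  else acc

-- outer `while True` loop of A, carrying the pieces list; `fuel` is a pure totality
-- guard (each iteration advances start by ≥ 2, so length + 1 iterations never run out)
def pvLoopA (cs : List Char) (fuel start : Nat) (acc : List (String × String)) : List (String × String) :=
  match fuel with
  | 0 => acc
  | fuel + 1 =>
    if pvFindA cs start = -1 then
      acc ++ [("text", String.ofList (PySem.List.slice cs (some (start : Int)) none))]
    else
      pvLoopA cs fuel (pvScanIA cs (pvFindA cs start).toNat)
        (pvAccA cs start (pvFindA cs start).toNat acc ++
          [("expr", String.ofList (PySem.List.slice cs (some ((pvFindA cs start).toNat : Int))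
            (some (pvScanIA cs (pvFindA cs start).toNat : Int))))])

def split_template (content : String) : List (String × String) :=
  pvLoopA content.toList (content.toList.length + 1) 0 []

-- ===== PORT B =====
-- B's single for-loop over the characters: state = (pieces, buf, ebuf, inExpr, dollar, depth, quote, escaped)
def pvStepsB (pieces : List (String × String)) (buf ebuf : List Char) (inExpr dollar : Bool)
    (depth : Int) (quote : Option Char) (escaped : Bool) : List Char → List (String × String)
  | [] =>
    if inExpr then pieces ++ [("expr", String.ofList ebuf), ("text", "")]
    else if dollar then pieces ++ [("text", String.ofList (buf ++ ['$']))]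
    else pieces ++ [("text", String.ofList buf)]
  | ch :: rest =>
    if inExpr then
      let ebuf' := ebuf ++ [ch]
      match quote with
      | some q =>
        if escaped then pvStepsB pieces buf ebuf' inExpr dollar depth (some q) false rest
        else if ch = '\\' then pvStepsB pieces buf ebuf' inExpr dollar depth (some q) true rest
        else if ch = q then pvStepsB pieces buf ebuf' inExpr dollar depth none escaped rest
        else pvStepsB pieces buf ebuf' inExpr dollar depth (some q) escaped rest
      | none =>
        if ch = '"' ∨ ch = '\'' ∨ ch = '`' then pvStepsB pieces buf ebuf' inExpr dollar depth (some ch) escaped rest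
        else if ch = '{' then pvStepsB pieces buf ebuf' inExpr dollar (depth + 1) none escaped rest
        else if ch = '}' then
          if depth - 1 = 0 then
            pvStepsB (pieces ++ [("expr", String.ofList ebuf')]) buf [] false dollar (depth - 1) none escaped rest
          else pvStepsB pieces buf ebuf' inExpr dollar (depth - 1) none escaped rest
        else pvStepsB pieces buf ebuf' inExpr dollar depth none escaped rest
    else if dollar then
      if ch = '{' then
        pvStepsB (if buf ≠ [] then pieces ++ [("text", String.ofList buf)] else pieces)
          [] ['$', '{'] true false 1 none false rest
      else if ch = '$' then pvStepsB pieces (buf ++ ['$']) ebuf false true depth quote escaped rest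
      else pvStepsB pieces (buf ++ ['$', ch]) ebuf false false depth quote escaped rest
    else
      if ch = '$' then pvStepsB pieces buf ebuf false true depth quote escaped rest
      else pvStepsB pieces (buf ++ [ch]) ebuf false false depth quote escaped rest

def split_template_alt (content : String) : List (String × String) :=
  pvStepsB [] [] [] false false 0 none false content.toList

-- ===== PRECONDITION & SPEC =====
def Spec_split_template (content : String) (out : List (String × String)) : Prop := out = split_template_alt content
instance (content : String) (out : List (String × String)) : Decidable (Spec_split_template content out) := by unfold Spec_split_template; infer_instance

-- ===== CLAIM (what is proved, stated in full; the proofs are below) =====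
def Claim_equal_split_template : Prop := ∀ (content : String), Dom_split_template content → Spec_split_template content (split_template content)

-- ===== LEMMAS AND PROOFS =====

theorem pvDec2 {n i : Nat} (h : i < n) : n - (i + 2) < n - i := by omega

-- proof-only reference machine: A's algorithm rewritten as one index loop (bridges A's slices to B's buffers)
def pvLoopI (cs : List Char) (i tStart eStart : Nat) (mode : Bool) (depth : Int)
    (quote : Option Char) (escaped : Bool) (acc : List (String × String)) : List (String × String) :=
  if h : i < cs.length then
    let ch := cs[i]
    if mode then
      if ch = '$' ∧ i + 1 < cs.length ∧ cs.getD (i + 1) ' ' = '{' then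
        pvLoopI cs (i + 2) tStart i false 1 none false
          (if tStart < i then
            acc ++ [("text", String.ofList (PySem.List.slice cs (some (tStart : Int)) (some (i : Int))))]
           else acc)
      else pvLoopI cs (i + 1) tStart eStart mode depth quote escaped acc
    else
      match quote with
      | some q =>
        if escaped then pvLoopI cs (i + 1) tStart eStart mode depth (some q) false acc
        else if ch = '\\' then pvLoopI cs (i + 1) tStart eStart mode depth (some q) true acc
        else if ch = q then pvLoopI cs (i + 1) tStart eStart mode depth none escaped acc
        else pvLoopI cs (i + 1) tStart eStart mode depth (some q) escaped acc
      | none =>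
        if ch = '"' ∨ ch = '\'' ∨ ch = '`' then pvLoopI cs (i + 1) tStart eStart mode depth (some ch) escaped acc
        else if ch = '{' then pvLoopI cs (i + 1) tStart eStart mode (depth + 1) none escaped acc
        else if ch = '}' then
          if depth - 1 = 0 then
            pvLoopI cs (i + 1) (i + 1) eStart true (depth - 1) none escaped
              (acc ++ [("expr", String.ofList (PySem.List.slice cs (some (eStart : Int)) (some ((i : Int) + 1))))])
          else pvLoopI cs (i + 1) tStart eStart mode (depth - 1) none escaped acc
        else pvLoopI cs (i + 1) tStart eStart mode depth none escaped acc
  else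
    (if mode then acc
     else acc ++ [("expr", String.ofList (PySem.List.slice cs (some (eStart : Int)) none))]) ++
    [("text", String.ofList (PySem.List.slice cs (some ((if mode then tStart else cs.length) : Int)) none))]
termination_by cs.length - i
decreasing_by all_goals first | exact pvDec2 h | exact pvDec1 h

theorem pvExprScanA_ge (cs : List Char) (i : Nat) (d : Int) (q : Option Char) (e : Bool) :
    i ≤ pvExprScanA cs i d q e := by
  fun_induction pvExprScanA <;> omega

theorem pvExprScanA_le (cs : List Char) (i : Nat) (d : Int) (q : Option Char) (e : Bool)
    (h : i ≤ cs.length) : pvExprScanA cs i d q e ≤ cs.length := by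
  fun_induction pvExprScanA <;> omega

-- '${' occurs at position j (the condition pvLoopI's text mode tests)
def pvHitP (cs : List Char) (j : Nat) : Prop :=
  j + 1 < cs.length ∧ cs.getD j ' ' = '$' ∧ cs.getD (j + 1) ' ' = '{'

theorem pvPrefix_db_iff (cs : List Char) (j : Nat) :
    (['$', '{'] <+: cs.drop j) ↔ pvHitP cs j := by
  unfold pvHitP
  constructor
  · rintro ⟨t, ht⟩
    have hlen : j + 1 < cs.length := by
      have := congrArg List.length ht
      simp [List.length_drop] at this
      omega
    have h0 : cs.drop j = '$' :: '{' :: t := by simpa using ht.symm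
    have e1 : cs[j] = '$' := by
      have h := List.getElem_drop (xs := cs) (i := j) (j := 0) (h := by simp; omega)
      simp only [Nat.add_zero] at h
      rw [← h]; simp [h0]
    have e2 : cs[j+1] = '{' := by
      have h := List.getElem_drop (xs := cs) (i := j) (j := 1) (h := by simp; omega)
      rw [← h]; simp [h0]
    exact ⟨hlen, by simp [hlen, e1, e2, Nat.lt_of_succ_lt hlen]⟩
  · rintro ⟨hlen, h1, h2⟩
    refine ⟨cs.drop (j + 2), ?_⟩
    rw [List.drop_eq_getElem_cons (l := cs) (i := j) (by omega),
        List.drop_eq_getElem_cons (l := cs) (i := j+1) (by omega)]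
    simp [hlen, Nat.lt_of_succ_lt hlen] at h1 h2
    simp [h1, h2]

-- pvLoopI's expr mode runs A's inner scan: it ends at exactly pvExprScanA's index,
-- emits the expr piece, and drops back into text mode there
theorem pvExprI (cs : List Char) : ∀ (m i : Nat) (d : Int) (q : Option Char) (esc : Bool)
    (t eSt : Nat) (acc : List (String × String)),
    cs.length - i ≤ m → 0 < d → (q = none → esc = false) →
    pvLoopI cs i t eSt false d q esc acc =
      pvLoopI cs (pvExprScanA cs i d q esc) (pvExprScanA cs i d q esc) eSt true 0 none false
        (acc ++ [("expr", String.ofList ((cs.drop eSt).take (pvExprScanA cs i d q esc - eSt)))]) := by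
  intro m
  induction m with
  | zero =>
    intro i d q esc t eSt acc hm hd hqe
    have hi : ¬ i < cs.length := by omega
    have hscan : pvExprScanA cs i d q esc = i := by
      rw [pvExprScanA]; rw [dif_neg (by omega)]
    rw [hscan]
    rw [pvLoopI]; rw [dif_neg hi]
    rw [pvLoopI]; rw [dif_neg hi]
    have htake : (cs.drop eSt).take (i - eSt) = cs.drop eSt :=
      List.take_of_length_le (by simp [List.length_drop]; omega)
    have t1 : List.drop cs.length cs = ([] : List Char) := List.drop_eq_nil_of_le (le_refl _)
    have t2 : List.drop i cs = ([] : List Char) := List.drop_eq_nil_of_le (by omega)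
    simp [htake, PySem.List.slice_from_natCast, t1, t2]
  | succ m ih =>
    intro i d q esc t eSt acc hm hd hqe
    by_cases hi : i < cs.length
    · rcases q with _ | qc
      · -- quote is None, so escaped = false
        have he0 : esc = false := hqe rfl
        subst he0
        by_cases hq : cs[i] = '"' ∨ cs[i] = '\'' ∨ cs[i] = '`'
        · have hscan : pvExprScanA cs i d none false
              = pvExprScanA cs (i+1) d (some (cs[i])) false := by
            conv_lhs => rw [pvExprScanA]
            simp [hi, hd, hq]
          rw [hscan, pvLoopI]
          rw [dif_pos hi]
          simp only [Bool.false_eq_true, if_false, if_pos hq]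
          exact ih (i+1) d (some cs[i]) false t eSt acc (by omega) hd (by simp)
        · by_cases hob : cs[i] = '{'
          · have hscan : pvExprScanA cs i d none false
                = pvExprScanA cs (i+1) (d+1) none false := by
              conv_lhs => rw [pvExprScanA]
              simp [hi, hd, hq, hob]
            rw [hscan, pvLoopI]
            rw [dif_pos hi]
            simp only [Bool.false_eq_true, if_false, if_neg hq, if_pos hob]
            exact ih (i+1) (d+1) none false t eSt acc (by omega) (by omega) (fun _ => rfl)
          · by_cases hcb : cs[i] = '}'
            · have hscan : pvExprScanA cs i d none false
                  = pvExprScanA cs (i+1) (d-1) none false := by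
                conv_lhs => rw [pvExprScanA]
                simp [hi, hd, hq, hob, hcb]
              by_cases hz : d - 1 = 0
              · have hstop : pvExprScanA cs (i+1) (d-1) none false = i + 1 := by
                  rw [pvExprScanA]; rw [dif_neg (by omega)]
                rw [hscan, hstop, pvLoopI]
                rw [dif_pos hi]
                simp only [Bool.false_eq_true, if_false, if_neg hq, if_neg hob, if_pos hcb, if_pos hz]
                have hpiece : PySem.List.slice cs (some (eSt : Int)) (some ((i : Int) + 1))
                    = (cs.drop eSt).take ((i + 1) - eSt) := by
                  rw [show ((i : Int) + 1) = (((i + 1 : Nat)) : Int) by push_cast; ring]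
                  exact PySem.List.slice_natCast cs eSt (i+1)
                rw [hpiece, hz]
              · have hd1 : 0 < d - 1 := by omega
                rw [hscan, pvLoopI]
                rw [dif_pos hi]
                simp only [Bool.false_eq_true, if_false, if_neg hq, if_neg hob, if_pos hcb, if_neg hz]
                exact ih (i+1) (d-1) none false t eSt acc (by omega) hd1 (fun _ => rfl)
            · have hscan : pvExprScanA cs i d none false
                  = pvExprScanA cs (i+1) d none false := by
                conv_lhs => rw [pvExprScanA]
                simp [hi, hd, hq, hob, hcb]
              rw [hscan, pvLoopI]
              rw [dif_pos hi]
              simp only [Bool.false_eq_true, if_false, if_neg hq, if_neg hob, if_neg hcb]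
              exact ih (i+1) d none false t eSt acc (by omega) hd (fun _ => rfl)
      · -- inside a quote
        by_cases hesc : esc = true
        · subst hesc
          have hscan : pvExprScanA cs i d (some qc) true
              = pvExprScanA cs (i+1) d (some qc) false := by
            conv_lhs => rw [pvExprScanA]
            simp [hi, hd]
          rw [hscan, pvLoopI]
          rw [dif_pos hi]
          simp only [Bool.false_eq_true, if_false, if_true]
          exact ih (i+1) d (some qc) false t eSt acc (by omega) hd (by simp)
        · have he0 : esc = false := by simpa using hesc
          subst he0
          by_cases hbs : cs[i] = '\\'
          · have hscan : pvExprScanA cs i d (some qc) false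
                = pvExprScanA cs (i+1) d (some qc) true := by
              conv_lhs => rw [pvExprScanA]
              simp [hi, hd, hbs]
            rw [hscan, pvLoopI]
            rw [dif_pos hi]
            simp only [Bool.false_eq_true, if_false, if_pos hbs]
            exact ih (i+1) d (some qc) true t eSt acc (by omega) hd (by simp)
          · by_cases hqc : cs[i] = qc
            · have hscan : pvExprScanA cs i d (some qc) false
                  = pvExprScanA cs (i+1) d none false := by
                conv_lhs => rw [pvExprScanA]
                rw [dif_pos (show i < cs.length ∧ 0 < d from ⟨hi, hd⟩)]
                simp only [Bool.false_eq_true, if_false, if_neg hbs, if_pos hqc]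
              rw [hscan, pvLoopI]
              rw [dif_pos hi]
              simp only [Bool.false_eq_true, if_false, if_neg hbs, if_pos hqc]
              exact ih (i+1) d none false t eSt acc (by omega) hd (fun _ => rfl)
            · have hscan : pvExprScanA cs i d (some qc) false
                  = pvExprScanA cs (i+1) d (some qc) false := by
                conv_lhs => rw [pvExprScanA]
                simp [hi, hd, hbs, hqc]
              rw [hscan, pvLoopI]
              rw [dif_pos hi]
              simp only [Bool.false_eq_true, if_false, if_neg hbs, if_neg hqc]
              exact ih (i+1) d (some qc) false t eSt acc (by omega) hd (by simp)
    · have hscan : pvExprScanA cs i d q esc = i := by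
        rw [pvExprScanA]; rw [dif_neg (by omega)]
      rw [hscan]
      rw [pvLoopI]; rw [dif_neg hi]
      rw [pvLoopI]; rw [dif_neg hi]
      have htake : (cs.drop eSt).take (i - eSt) = cs.drop eSt :=
        List.take_of_length_le (by simp [List.length_drop]; omega)
      have t1 : List.drop cs.length cs = ([] : List Char) := List.drop_eq_nil_of_le (le_refl _)
      have t2 : List.drop i cs = ([] : List Char) := List.drop_eq_nil_of_le (by omega)
      simp [htake, PySem.List.slice_from_natCast, t1, t2]

-- pvLoopI's text mode steps over a position with no '${'
theorem pvTextStep (cs : List Char) (i t e : Nat) (acc : List (String × String))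
    (hi : i < cs.length) (hno : ¬ pvHitP cs i) :
    pvLoopI cs i t e true 0 none false acc = pvLoopI cs (i+1) t e true 0 none false acc := by
  unfold pvHitP at hno
  rw [pvLoopI]
  rw [dif_pos hi]
  have hc : ¬ (cs[i] = '$' ∧ i + 1 < cs.length ∧ cs.getD (i + 1) ' ' = '{') := by
    intro ⟨h1, h2, h3⟩
    exact hno ⟨h2, by simp [hi, h1], h3⟩
  simp only [if_neg hc]
  simp

-- pvLoopI's text mode skips a whole '${'-free region
theorem pvTextRun (cs : List Char) : ∀ (m i k t e : Nat) (acc : List (String × String)),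
    k - i ≤ m → i ≤ k → k ≤ cs.length → (∀ j, i ≤ j → j < k → ¬ pvHitP cs j) →
    pvLoopI cs i t e true 0 none false acc = pvLoopI cs k t e true 0 none false acc := by
  intro m
  induction m with
  | zero =>
    intro i k t e acc hm hik hk _
    have : i = k := by omega
    rw [this]
  | succ m ih =>
    intro i k t e acc hm hik hk hno
    by_cases heq : i = k
    · rw [heq]
    · have hi : i < cs.length := by omega
      rw [pvTextStep cs i t e acc hi (hno i (le_refl i) (by omega))]
      exact ih (i+1) k t e acc (by omega) (by omega) hk (fun j hj hj' => hno j (by omega) hj')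

-- A's loop equals the reference index machine, piece by piece
theorem pvMainAux (cs : List Char) : ∀ (m start eSt : Nat) (acc : List (String × String)),
    cs.length + 1 - start ≤ m → start ≤ cs.length →
    pvLoopA cs m start acc = pvLoopI cs start start eSt true 0 none false acc := by
  intro m
  induction m with
  | zero => intro start eSt acc hm hs; omega
  | succ m ih =>
    intro start eSt acc hm hs
    rw [pvLoopA]
    by_cases he : pvFindA cs start = -1
    · rw [if_pos he]
      rw [show pvFindA cs start = PySem.Chars.findFrom cs ['$', '{'] (start : Int) none from rfl] at he
      have hnone : ∀ j, start ≤ j → ¬ pvHitP cs j := by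
        intro j hj hhit
        have hpre : ['$', '{'] <+: cs.drop j := (pvPrefix_db_iff cs j).mpr hhit
        have hsuf : cs.drop j <:+ cs.drop start := by
          rw [show cs.drop j = (cs.drop start).drop (j - start) by
            rw [List.drop_drop]; congr 1; omega]
          exact List.drop_suffix _ _
        exact ((PySem.Chars.findFrom_natCast_eq_neg_one_iff cs _ start hs).mp he)
          (hpre.isInfix.trans hsuf.isInfix)
      rw [pvTextRun cs (cs.length - start) start cs.length start eSt acc (by omega) hs
        (le_refl _) (fun j hj _ => hnone j hj)]
      rw [pvLoopI]; rw [dif_neg (by omega)]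
      simp
    · rw [if_neg he]
      rw [show pvFindA cs start = PySem.Chars.findFrom cs ['$', '{'] (start : Int) none from rfl] at he ⊢
      obtain ⟨h1, h2, h3⟩ := PySem.Chars.findFrom_natCast_spec cs ['$', '{'] start hs he
      have heN2 : (PySem.Chars.findFrom cs ['$', '{'] (start : Int) none).toNat + 2 ≤ cs.length := by
        have := h2.length_le
        simp [List.length_drop] at this
        omega
      set eN : Nat := (PySem.Chars.findFrom cs ['$', '{'] (start : Int) none).toNat with heNdef
      have hse : start ≤ eN := by omega
      have hhit : pvHitP cs eN := (pvPrefix_db_iff cs eN).mp h2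
      have hnoj : ∀ j, start ≤ j → j < eN → ¬ pvHitP cs j := by
        intro j hj hj' hhitj
        exact h3 j hj hj' ((pvPrefix_db_iff cs j).mpr hhitj)
      rw [pvTextRun cs (eN - start) start eN start eSt acc (by omega) hse (by omega) hnoj]
      obtain ⟨hlt, hd, hb⟩ := hhit
      have hiN : eN < cs.length := by omega
      have hd' : cs[eN] = '$' := by simpa [List.getD_eq_getElem, hiN] using hd
      have hb' : cs[eN + 1] = '{' := by simpa [List.getD_eq_getElem, hlt] using hb
      have hb'' : cs.getD (eN + 1) ' ' = '{' := by simp [hlt, hb']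
      rw [pvLoopI]
      simp only [dif_pos hiN]
      simp only [if_pos (show cs[eN] = '$' ∧ eN + 1 < cs.length ∧ cs.getD (eN + 1) ' ' = '{' from ⟨hd', hlt, hb''⟩)]
      set acc2 : List (String × String) :=
        if start < eN then
          acc ++ [("text", String.ofList (PySem.List.slice cs (some (start : Int)) (some (eN : Int))))]
        else acc with hacc2
      rw [pvExprI cs (cs.length - (eN + 2)) (eN + 2) 1 none false start eN acc2
        (by omega) (by omega) (fun _ => rfl)]
      rw [show pvScanIA cs eN = pvExprScanA cs (eN + 2) 1 none false from rfl,
          show pvAccA cs start eN acc = acc2 from rfl]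
      set i' : Nat := pvExprScanA cs (eN + 2) 1 none false with hi'def
      have hge : eN + 2 ≤ i' := pvExprScanA_ge cs (eN + 2) 1 none false
      have hle : i' ≤ cs.length := pvExprScanA_le cs (eN + 2) 1 none false (by omega)
      rw [show String.ofList (PySem.List.slice cs (some (eN : Int)) (some (i' : Int)))
            = String.ofList ((cs.drop eN).take (i' - eN)) by
          rw [PySem.List.slice_natCast]]
      exact ih i' eN (acc2 ++ [("expr", String.ofList ((cs.drop eN).take (i' - eN)))])
        (by omega) hle

-- ======== bridge: B's char-stream machine equals the reference index machine ========

-- content[a:b] as the character buffer B accumulates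
def pvSeg (cs : List Char) (a b : Nat) : List Char := (cs.drop a).take (b - a)

theorem pvSeg_slice (cs : List Char) (a b : Nat) :
    PySem.List.slice cs (some (a : Int)) (some (b : Int)) = pvSeg cs a b :=
  PySem.List.slice_natCast cs a b

theorem pvSeg_nil (cs : List Char) (a : Nat) : pvSeg cs a a = [] := by simp [pvSeg]

theorem pvSeg_snoc (cs : List Char) (a b : Nat) (hab : a ≤ b) (hb : b < cs.length) :
    pvSeg cs a b ++ [cs[b]] = pvSeg cs a (b + 1) := by
  unfold pvSeg
  have h1 : b + 1 - a = (b - a) + 1 := by omega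
  have h2 : b - a < (cs.drop a).length := by simp [List.length_drop]; omega
  rw [h1, List.take_succ, List.getElem?_eq_getElem h2]
  congr 2
  rw [List.getElem_drop]
  congr 1
  omega

theorem pvSeg_full (cs : List Char) (a : Nat) : pvSeg cs a cs.length = cs.drop a := by
  unfold pvSeg
  exact List.take_of_length_le (by simp [List.length_drop])

theorem pvSeg_ne_nil_iff (cs : List Char) (a b : Nat) (hb : b ≤ cs.length) :
    (pvSeg cs a b ≠ []) ↔ a < b := by
  unfold pvSeg
  rw [← List.length_pos_iff_ne_nil]
  simp [List.length_take, List.length_drop]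
  omega

theorem pvTermA (cs : List Char) (t e : Nat) (acc : List (String × String)) (eb : List Char)
    (d : Int) (q : Option Char) (esc : Bool) (d2 : Int) (q2 : Option Char) (esc2 : Bool)
    (ht : t ≤ cs.length) :
    pvStepsB acc (pvSeg cs t cs.length) eb false false d q esc (cs.drop cs.length)
      = pvLoopI cs cs.length t e true d2 q2 esc2 acc := by
  rw [List.drop_length, pvStepsB, pvLoopI, dif_neg (lt_irrefl cs.length)]
  simp [pvSeg_full, PySem.List.slice_from_natCast]

theorem pvTermB (cs : List Char) (t e : Nat) (acc : List (String × String)) (eb : List Char)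
    (d : Int) (q : Option Char) (esc : Bool) (d2 : Int) (q2 : Option Char) (esc2 : Bool)
    (ht : t < cs.length) (hdol : cs.getD (cs.length - 1) ' ' = '$') :
    pvStepsB acc (pvSeg cs t (cs.length - 1)) eb false true d q esc (cs.drop cs.length)
      = pvLoopI cs (cs.length - 1) t e true d2 q2 esc2 acc := by
  have hn1 : cs.length - 1 < cs.length := by omega
  have hch : cs[cs.length - 1] = '$' := by simpa [List.getD_eq_getElem, hn1] using hdol
  rw [List.drop_length, pvStepsB]
  rw [pvLoopI, dif_pos hn1]
  have hc : ¬ (cs[cs.length - 1] = '$' ∧ cs.length - 1 + 1 < cs.length ∧ cs.getD (cs.length - 1 + 1) ' ' = '{') := by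
    rintro ⟨_, h2, _⟩; omega
  simp only [eq_self_iff_true, if_true, if_neg hc]
  rw [show cs.length - 1 + 1 = cs.length from by omega]
  rw [pvLoopI, dif_neg (lt_irrefl cs.length)]
  have hsnoc : pvSeg cs t (cs.length - 1) ++ ['$'] = pvSeg cs t cs.length := by
    rw [← hch, pvSeg_snoc cs t (cs.length - 1) (by omega) hn1]
    congr 1; omega
  simp [hsnoc, pvSeg_full, PySem.List.slice_from_natCast]

theorem pvTermC (cs : List Char) (t eSt : Nat) (acc : List (String × String))
    (d : Int) (q : Option Char) (esc : Bool) (he : eSt ≤ cs.length) :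
    pvStepsB acc [] (pvSeg cs eSt cs.length) true false d q esc (cs.drop cs.length)
      = pvLoopI cs cs.length t eSt false d q esc acc := by
  rw [List.drop_length, pvStepsB, pvLoopI, dif_neg (lt_irrefl cs.length)]
  have t1 : List.drop cs.length cs = ([] : List Char) := List.drop_eq_nil_of_le (le_refl _)
  simp [pvSeg_full, PySem.List.slice_from_natCast, t1]

theorem pvBridge (cs : List Char) : ∀ (m : Nat),
    (∀ (i t e : Nat) (acc : List (String × String)) (eb : List Char) (d : Int) (q : Option Char)
       (esc : Bool) (d2 : Int) (q2 : Option Char) (esc2 : Bool),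
       cs.length - i ≤ m → t ≤ i → i ≤ cs.length →
       pvStepsB acc (pvSeg cs t i) eb false false d q esc (cs.drop i)
         = pvLoopI cs i t e true d2 q2 esc2 acc)
    ∧ (∀ (i t e : Nat) (acc : List (String × String)) (eb : List Char) (d : Int) (q : Option Char)
       (esc : Bool) (d2 : Int) (q2 : Option Char) (esc2 : Bool),
       cs.length - i ≤ m → t < i → i ≤ cs.length → cs.getD (i - 1) ' ' = '$' →
       pvStepsB acc (pvSeg cs t (i - 1)) eb false true d q esc (cs.drop i)
         = pvLoopI cs (i - 1) t e true d2 q2 esc2 acc)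
    ∧ (∀ (i t eSt : Nat) (acc : List (String × String)) (d : Int) (q : Option Char) (esc : Bool),
       cs.length - i ≤ m → eSt ≤ i → i ≤ cs.length → 0 < d → (q = none → esc = false) →
       pvStepsB acc [] (pvSeg cs eSt i) true false d q esc (cs.drop i)
         = pvLoopI cs i t eSt false d q esc acc) := by
  intro m
  induction m with
  | zero =>
    refine ⟨?_, ?_, ?_⟩
    · intro i t e acc eb d q esc d2 q2 esc2 hm ht hi
      have hieq : i = cs.length := by omega
      subst hieq
      exact pvTermA cs t e acc eb d q esc d2 q2 esc2 ht
    · intro i t e acc eb d q esc d2 q2 esc2 hm ht hi hgd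
      have hieq : i = cs.length := by omega
      subst hieq
      exact pvTermB cs t e acc eb d q esc d2 q2 esc2 ht hgd
    · intro i t eSt acc d q esc hm he hi hd hqe
      have hieq : i = cs.length := by omega
      subst hieq
      exact pvTermC cs t eSt acc d q esc he
  | succ m ih =>
    obtain ⟨ihA, ihB, ihC⟩ := ih
    refine ⟨?_, ?_, ?_⟩
    · -- text mode, no pending dollar
      intro i t e acc eb d q esc d2 q2 esc2 hm ht hi
      by_cases hieq : i = cs.length
      · subst hieq; exact pvTermA cs t e acc eb d q esc d2 q2 esc2 ht
      · have hi' : i < cs.length := by omega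
        rw [List.drop_eq_getElem_cons hi', pvStepsB]
        by_cases hds : cs[i] = '$'
        · simp only [Bool.false_eq_true, if_false, if_pos hds]
          have hb := ihB (i+1) t e acc eb d q esc d2 q2 esc2 (by omega) (by omega) (by omega)
            (by simpa [hi'] using hds)
          simpa using hb
        · simp only [Bool.false_eq_true, if_false, if_neg hds]
          rw [pvSeg_snoc cs t i ht hi']
          rw [pvLoopI, dif_pos hi']
          have hc : ¬ (cs[i] = '$' ∧ i + 1 < cs.length ∧ cs.getD (i + 1) ' ' = '{') := by
            rintro ⟨h1, _, _⟩; exact hds h1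
          simp only [if_pos rfl, if_neg hc]
          exact ihA (i+1) t e acc eb d q esc d2 q2 esc2 (by omega) (by omega) (by omega)
    · -- text mode, pending dollar at i-1
      intro i t e acc eb d q esc d2 q2 esc2 hm ht hi hgd
      obtain ⟨j, rfl⟩ : ∃ j, i = j + 1 := ⟨i - 1, by omega⟩
      simp only [Nat.add_sub_cancel] at hgd ⊢
      have hj : j < cs.length := by omega
      have hi' : j + 1 ≤ cs.length := hi
      have hchj : cs[j] = '$' := by rw [List.getD_eq_getElem (hn := hj)] at hgd; exact hgd
      by_cases hieq : j + 1 = cs.length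
      · have hjeq : j = cs.length - 1 := by omega
        subst hjeq
        rw [show cs.length - 1 + 1 = cs.length by omega]
        exact pvTermB cs t e acc eb d q esc d2 q2 esc2 (by omega) hgd
      · have hi1 : j + 1 < cs.length := by omega
        rw [List.drop_eq_getElem_cons hi1, pvStepsB]
        rw [pvLoopI, dif_pos hj]
        by_cases hob : cs[j+1] = '{'
        · -- enter expression mode
          have hobT : cs.getD (j + 1) ' ' = '{' := by
            rw [List.getD_eq_getElem (hn := hi1)]; exact hob
          simp only [Bool.false_eq_true, if_false, eq_self_iff_true, if_true, if_pos hob]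
          have hacc : (if pvSeg cs t j ≠ [] then acc ++ [("text", String.ofList (pvSeg cs t j))] else acc)
              = (if t < j then
                  acc ++ [("text", String.ofList (PySem.List.slice cs (some (t : Int)) (some (j : Int))))]
                 else acc) := by
            rw [pvSeg_slice]
            by_cases htj : t < j
            · rw [if_pos ((pvSeg_ne_nil_iff cs t j (by omega)).mpr htj), if_pos htj]
            · rw [if_neg (by simpa using fun hh => htj ((pvSeg_ne_nil_iff cs t j (by omega)).mp hh)),
                  if_neg htj]
          rw [hacc]
          have hseg2 : pvSeg cs j (j + 1 + 1) = ['$', '{'] := by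
            rw [← pvSeg_snoc cs j (j+1) (by omega) hi1,
                ← pvSeg_snoc cs j j (le_refl j) hj, pvSeg_nil]
            exact congrArg₂ (fun a b => ([a, b] : List Char)) hchj hob
          have hc := ihC (j+1+1) t j
            (if t < j then
              acc ++ [("text", String.ofList (PySem.List.slice cs (some (t : Int)) (some (j : Int))))]
             else acc) 1 none false (by omega) (by omega) (by omega) (by omega) (fun _ => rfl)
          rw [hseg2] at hc
          rw [hc]
          split_ifs with h1 h2 h3 <;>
            first
              | rfl
              | exact absurd (show cs[j] = '$' ∧ j + 1 < cs.length ∧ cs.getD (j + 1) ' ' = '{'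
                  from ⟨hchj, hi1, hobT⟩) (by assumption)
        · simp only [Bool.false_eq_true, if_false, eq_self_iff_true, if_true, if_neg hob]
          have hobD : ¬ cs.getD (j + 1) ' ' = '{' := by
            rw [List.getD_eq_getElem (hn := hi1)]; exact hob
          by_cases hds : cs[j+1] = '$'
          · simp only [if_pos hds]
            have hsnoc : pvSeg cs t j ++ ['$'] = pvSeg cs t (j+1) :=
              (congrArg (fun c => pvSeg cs t j ++ [c]) hchj).symm.trans
                (pvSeg_snoc cs t j (by omega) hj)
            rw [hsnoc]
            have hb := ihB (j+1+1) t e acc eb d q esc d2 q2 esc2 (by omega) (by omega) (by omega)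
              (by rw [Nat.add_sub_cancel, List.getD_eq_getElem (hn := hi1)]; exact hds)
            rw [Nat.add_sub_cancel] at hb
            rw [hb]
            split_ifs with h1 h2 h3 <;>
              first
                | rfl
                | exact absurd (show cs[j] = '$' ∧ j + 1 < cs.length ∧ cs.getD (j + 1) ' ' = '{'
                    by assumption).2.2 hobD
          · simp only [if_neg hds]
            have hA : pvSeg cs t j ++ ['$'] = pvSeg cs t (j+1) :=
              (congrArg (fun c => pvSeg cs t j ++ [c]) hchj).symm.trans
                (pvSeg_snoc cs t j (by omega) hj)
            have hsnoc : pvSeg cs t j ++ ['$', cs[j+1]] = pvSeg cs t (j+1+1) := by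
              rw [show (['$', cs[j+1]] : List Char) = ['$'] ++ [cs[j+1]] from rfl,
                  ← List.append_assoc, hA, pvSeg_snoc cs t (j+1) (by omega) hi1]
            rw [hsnoc]
            split_ifs with hs1 <;>
              first
                | exact absurd hs1.2.2 hobD
                | (rw [pvLoopI, dif_pos hi1]
                   simp only [eq_self_iff_true, if_true]
                   split_ifs with hs4
                   · exact absurd hs4.1 hds
                   · exact ihA (j+1+1) t e acc eb d q esc d2 q2 esc2 (by omega) (by omega)
                       (by omega))
    · -- expression mode
      intro i t eSt acc d q esc hm he hi hd hqe
      by_cases hieq : i = cs.length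
      · subst hieq; exact pvTermC cs t eSt acc d q esc he
      · have hi' : i < cs.length := by omega
        rw [List.drop_eq_getElem_cons hi', pvStepsB]
        rw [pvLoopI, dif_pos hi']
        have hsnoc : pvSeg cs eSt i ++ [cs[i]] = pvSeg cs eSt (i+1) := pvSeg_snoc cs eSt i he hi'
        rcases q with _ | qc
        · have he0 : esc = false := hqe rfl
          subst he0
          by_cases hq : cs[i] = '"' ∨ cs[i] = '\'' ∨ cs[i] = '`'
          · simp only [if_pos rfl, Bool.false_eq_true, if_false, if_pos hq]
            rw [hsnoc]
            exact ihC (i+1) t eSt acc d (some cs[i]) false (by omega) (by omega) (by omega) hd (by simp)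
          · by_cases hob : cs[i] = '{'
            · simp only [if_pos rfl, Bool.false_eq_true, if_false, if_neg hq, if_pos hob]
              rw [hsnoc]
              exact ihC (i+1) t eSt acc (d+1) none false (by omega) (by omega) (by omega)
                (by omega) (fun _ => rfl)
            · by_cases hcb : cs[i] = '}'
              · by_cases hz : d - 1 = 0
                · simp only [if_pos rfl, Bool.false_eq_true, if_false, if_neg hq, if_neg hob,
                    if_pos hcb, if_pos hz]
                  rw [hsnoc]
                  have hpiece : PySem.List.slice cs (some (eSt : Int)) (some ((i : Int) + 1))
                      = pvSeg cs eSt (i + 1) := by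
                    rw [show ((i : Int) + 1) = (((i + 1 : Nat)) : Int) by push_cast; ring]
                    exact pvSeg_slice cs eSt (i+1)
                  rw [hpiece]
                  have ha := ihA (i+1) (i+1) eSt
                    (acc ++ [("expr", String.ofList (pvSeg cs eSt (i + 1)))]) []
                    (d-1) none false (d-1) none false (by omega) (le_refl _) (by omega)
                  rw [pvSeg_nil] at ha
                  exact ha
                · simp only [if_pos rfl, Bool.false_eq_true, if_false, if_neg hq, if_neg hob,
                    if_pos hcb, if_neg hz]
                  rw [hsnoc]
                  exact ihC (i+1) t eSt acc (d-1) none false (by omega) (by omega) (by omega)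
                    (by omega) (fun _ => rfl)
              · simp only [if_pos rfl, Bool.false_eq_true, if_false, if_neg hq, if_neg hob, if_neg hcb]
                rw [hsnoc]
                exact ihC (i+1) t eSt acc d none false (by omega) (by omega) (by omega) hd (fun _ => rfl)
        · by_cases hesc : esc = true
          · subst hesc
            simp only [if_pos rfl]
            rw [hsnoc]
            exact ihC (i+1) t eSt acc d (some qc) false (by omega) (by omega) (by omega) hd (by simp)
          · have he0 : esc = false := by simpa using hesc
            subst he0
            by_cases hbs : cs[i] = '\\'
            · simp only [if_pos rfl, Bool.false_eq_true, if_false, if_pos hbs]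
              rw [hsnoc]
              exact ihC (i+1) t eSt acc d (some qc) true (by omega) (by omega) (by omega) hd (by simp)
            · by_cases hqc : cs[i] = qc
              · simp only [if_pos rfl, Bool.false_eq_true, if_false, if_neg hbs, if_pos hqc]
                rw [hsnoc]
                exact ihC (i+1) t eSt acc d none false (by omega) (by omega) (by omega) hd (fun _ => rfl)
              · simp only [if_pos rfl, Bool.false_eq_true, if_false, if_neg hbs, if_neg hqc]
                rw [hsnoc]
                exact ihC (i+1) t eSt acc d (some qc) false (by omega) (by omega) (by omega) hd (by simp)

-- ===== VERDICT (by name: the statement is the Claim_ definition above) =====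
theorem split_template_spec : Claim_equal_split_template := by
  intro content _
  unfold Spec_split_template split_template split_template_alt
  rw [pvMainAux content.toList (content.toList.length + 1) 0 0 [] (by omega) (by omega)]
  have h := ((pvBridge content.toList content.toList.length).1 0 0 0 [] [] 0 none false 0 none false
    (by omega) (by omega) (by omega)).symm
  simpa [pvSeg_nil] using h
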